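-- pv_equiv track=rewrite | github.com/esionascimento/RestaurantOrders | src/analyze_log.py | joao_never_days
-- ===== SOURCE A (Python) =====
-- def joao_never_days(client, data):
--     date_client = set()
--     date_joao = set()
--     for cur in data:
--         date_joao.add(cur["date"])
--         if cur["name"] == client:
--             date_client.add(cur["date"])
--     return date_joao - date_client
-- ===== SOURCE B (Python) =====
-- def joao_never_days(client, data):
--     by_date = {}
--     for cur in data:
--         by_date.setdefault(cur["date"], set()).add(cur["name"])
--     return {d for d, names in by_date.items() if client not in names}
-- ===== Notes on version B (the rewrite author's own statement) =====
-- stated objective: alternative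
-- what changed: Instead of maintaining two sets (all dates, client's dates) and returning their difference, B builds one dict mapping each date to the set of names seen on it and then collects, date by date, the dates whose name-set does not contain the client.
import Mathlib
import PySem

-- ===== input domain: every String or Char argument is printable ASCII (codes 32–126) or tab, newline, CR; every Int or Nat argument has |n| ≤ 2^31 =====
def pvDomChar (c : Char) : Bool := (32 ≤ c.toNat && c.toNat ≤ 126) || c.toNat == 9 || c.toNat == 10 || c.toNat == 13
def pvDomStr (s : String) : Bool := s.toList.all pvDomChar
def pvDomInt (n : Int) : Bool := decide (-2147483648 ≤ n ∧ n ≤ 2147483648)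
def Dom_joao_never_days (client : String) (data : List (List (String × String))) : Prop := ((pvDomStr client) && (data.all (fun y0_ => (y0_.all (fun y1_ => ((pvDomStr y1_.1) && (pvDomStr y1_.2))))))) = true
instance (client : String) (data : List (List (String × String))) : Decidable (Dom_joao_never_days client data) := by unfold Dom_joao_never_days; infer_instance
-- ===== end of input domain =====

-- B replaces A's two running sets + set difference by a per-date dict of name-sets
-- queried for the client date by date (same cost, different decomposition).

-- ===== PORT A =====
def joao_never_days (client : String) (data : List (List (String × String))) : List String :=
  let st := data.foldl
    (fun (st : PySem.Set String × PySem.Set String) cur =>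
      let dj := st.1.add ((PySem.Dict.mk cur).getD "date" "")
      let dc := if ((PySem.Dict.mk cur).getD "name" "") == client
                then st.2.add ((PySem.Dict.mk cur).getD "date" "")
                else st.2
      (dj, dc))
    (PySem.Set.empty, PySem.Set.empty)
  PySem.Set.diff st.1 st.2

-- ===== PORT B =====
def joao_never_days_alt (client : String) (data : List (List (String × String))) : List String :=
  let by_date : PySem.Dict String (PySem.Set String) :=
    data.foldl
      (fun d cur =>
        d.modify ((PySem.Dict.mk cur).getD "date" "") PySem.Set.empty
          (fun s => s.add ((PySem.Dict.mk cur).getD "name" "")))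
      PySem.Dict.empty
  by_date.items.foldl
    (fun acc p => if PySem.Set.contains p.2 client then acc else PySem.Set.add acc p.1)
    PySem.Set.empty

-- ===== PRECONDITION & SPEC =====
-- Pre_: every row has both a "date" and a "name" key; otherwise A raises KeyError.
def Pre_joao_never_days (client : String) (data : List (List (String × String))) : Prop :=
  ∀ cur ∈ data, (PySem.Dict.mk cur).contains "date" = true ∧ (PySem.Dict.mk cur).contains "name" = true
instance (client : String) (data : List (List (String × String))) : Decidable (Pre_joao_never_days client data) := by unfold Pre_joao_never_days; infer_instance
def pvWitness_joao_never_days : String × (List (List (String × String))) :=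
  ("joao", [[("date", "d1"), ("name", "maria")], [("date", "d2"), ("name", "joao")]])

def Spec_joao_never_days (client : String) (data : List (List (String × String))) (out : List String) : Prop := out = joao_never_days_alt client data
instance (client : String) (data : List (List (String × String))) (out : List String) : Decidable (Spec_joao_never_days client data out) := by unfold Spec_joao_never_days; infer_instance

-- ===== CLAIM (what is proved, stated in full; the proofs are below) =====
def Claim_equal_joao_never_days : Prop := ∀ (client : String) (data : List (List (String × String))), Dom_joao_never_days client data → Pre_joao_never_days client data → Spec_joao_never_days client data (joao_never_days client data)

-- ===== LEMMAS AND PROOFS =====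

-- abbreviations for the two field lookups
def pvDate (cur : List (String × String)) : String := (PySem.Dict.mk cur).getD "date" ""
def pvName (cur : List (String × String)) : String := (PySem.Dict.mk cur).getD "name" ""

-- A's paired fold splits into two independent folds
theorem pvFoldPair (client : String) (data : List (List (String × String)))
    (s1 s2 : PySem.Set String) :
    data.foldl
      (fun (st : PySem.Set String × PySem.Set String) cur =>
        (st.1.add (pvDate cur),
         if (pvName cur) == client then st.2.add (pvDate cur) else st.2))
      (s1, s2)
    = (data.foldl (fun s cur => s.add (pvDate cur)) s1,
       data.foldl (fun s cur => if (pvName cur) == client then s.add (pvDate cur) else s) s2) := by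
  induction data generalizing s1 s2 with
  | nil => rfl
  | cons a l ih => simp only [List.foldl_cons]; exact ih _ _

-- membership in A's date_client accumulator
theorem pvMemDC (client : String) (data : List (List (String × String)))
    (s2 : PySem.Set String) (x : String) :
    x ∈ data.foldl (fun s cur => if (pvName cur) == client then s.add (pvDate cur) else s) s2
    ↔ x ∈ s2 ∨ ∃ cur ∈ data, pvName cur = client ∧ pvDate cur = x := by
  induction data generalizing s2 with
  | nil => simp
  | cons a l ih =>
    simp only [List.foldl_cons, ih, List.mem_cons]
    by_cases h : pvName a = client <;>
      simp [h, PySem.Set.mem_add] <;> tauto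

-- membership of client in B's per-date name-set
theorem pvMemByDate (client : String) (data : List (List (String × String)))
    (d : PySem.Dict String (PySem.Set String)) (k : String) :
    client ∈ (data.foldl
        (fun d cur => d.modify (pvDate cur) PySem.Set.empty (fun s => s.add (pvName cur))) d).getD k PySem.Set.empty
    ↔ client ∈ d.getD k PySem.Set.empty ∨ ∃ cur ∈ data, pvDate cur = k ∧ pvName cur = client := by
  induction data generalizing d with
  | nil => simp
  | cons a l ih =>
    simp only [List.foldl_cons, ih, List.mem_cons]
    rw [PySem.Dict.getD_modify]
    by_cases h : k = pvDate a <;>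
      simp [h, PySem.Set.mem_add] <;> tauto

-- a nodup fold of conditional Set.add collects exactly the filter
theorem pvFoldFilter (p : String → Bool) :
    ∀ (l acc : List String), l.Nodup → (∀ x ∈ l, x ∉ acc) →
    l.foldl (fun acc x => if p x then acc else PySem.Set.add acc x) acc
      = acc ++ l.filter (fun x => !p x) := by
  intro l
  induction l with
  | nil => simp
  | cons a t ih =>
    intro acc hnd hdisj
    have ha : a ∉ acc := hdisj a (by simp)
    have hadd : PySem.Set.add acc a = acc ++ [a] := by
      simp [PySem.Set.add, PySem.Set.contains]
      intro h; exact absurd h ha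
    simp only [List.foldl_cons, List.filter_cons]
    by_cases hp : p a
    · rw [if_pos hp, ih acc hnd.of_cons (fun x hx => hdisj x (by simp [hx]))]
      simp [hp]
    · rw [if_neg hp, hadd,
        ih (acc ++ [a]) hnd.of_cons
          (fun x hx => by
            simp only [List.mem_append, List.mem_singleton]
            rintro (h | rfl)
            · exact hdisj x (by simp [hx]) h
            · exact (List.nodup_cons.mp hnd).1 hx)]
      simp [hp]

-- ===== VERDICT (by name: the statement is the Claim_ definition above) =====
theorem joao_never_days_spec : Claim_equal_joao_never_days := by
  intro client data _ _
  unfold Spec_joao_never_days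
  have hpair := pvFoldPair client data PySem.Set.empty PySem.Set.empty
  simp only [pvDate, pvName] at hpair
  simp only [joao_never_days, joao_never_days_alt]
  rw [hpair]
  set DJ := data.foldl (fun s cur => s.add ((PySem.Dict.mk cur).getD "date" "")) PySem.Set.empty with hDJ
  set DC := data.foldl (fun s cur => if ((PySem.Dict.mk cur).getD "name" "") == client then s.add ((PySem.Dict.mk cur).getD "date" "") else s) PySem.Set.empty with hDC
  set BD := data.foldl (fun d cur => d.modify ((PySem.Dict.mk cur).getD "date" "") PySem.Set.empty (fun s => s.add ((PySem.Dict.mk cur).getD "name" ""))) PySem.Dict.empty with hBD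
  have hnodup : BD.keys.Nodup := by
    have h := PySem.Dict.nodup_keys_foldl_modify_key data
      (fun cur => (PySem.Dict.mk cur).getD "date" "") PySem.Set.empty
      (fun _ cur s => PySem.Set.add s ((PySem.Dict.mk cur).getD "name" ""))
      PySem.Dict.empty (by simp)
    simpa using h
  have hkeys : BD.keys = DJ := by
    have h1 := PySem.Dict.keys_foldl_modify_key data
      (fun cur => (PySem.Dict.mk cur).getD "date" "") PySem.Set.empty
      (fun _ cur s => PySem.Set.add s ((PySem.Dict.mk cur).getD "name" ""))
      PySem.Dict.empty
    have h2 := PySem.Set.update_map_eq_foldl_add data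
      (fun cur => (PySem.Dict.mk cur).getD "date" "") (PySem.Set.empty : PySem.Set String)
    simp only [PySem.Dict.keys_empty] at h1
    simp only [] at h1 h2
    rw [hBD, hDJ, h1, ← h2]
    rfl
  rw [PySem.Dict.items_eq_map_keys BD hnodup PySem.Set.empty, List.foldl_map]
  simp only []
  rw [pvFoldFilter (fun k => PySem.Set.contains (BD.getD k PySem.Set.empty) client) BD.keys
      PySem.Set.empty hnodup (by simp [PySem.Set.empty]), hkeys]
  simp only [PySem.Set.diff, PySem.Set.empty, List.nil_append]
  apply List.filter_congr
  intro x hx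
  have hmDC := pvMemDC client data PySem.Set.empty x
  have hmBD := pvMemByDate client data PySem.Dict.empty x
  simp only [pvDate, pvName] at hmDC hmBD
  rw [← hDC] at hmDC
  rw [← hBD] at hmBD
  congr 1
  rw [Bool.eq_iff_iff]
  simp only [PySem.Set.empty, PySem.Set.contains, List.contains_iff_mem] at *
  rw [hmDC, hmBD]
  simp only [List.not_mem_nil, false_or, PySem.Dict.getD_empty]
  constructor
  · rintro ⟨cur, hc, h1, h2⟩; exact ⟨cur, hc, h2, h1⟩
  · rintro ⟨cur, hc, h1, h2⟩; exact ⟨cur, hc, h2, h1⟩
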